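-- pv_equiv track=rewrite | github.com/SujayBelsare/precogstuff | benchmarkings/fewBench.py | bfs_distance_to_empty
-- ===== SOURCE A (Python) =====
-- from collections import deque
--
-- def apply_transition(current_str, transition):
--     src = transition["src"]
--     tgt = transition["tgt"]
--     pos = current_str.find(src)
--     if pos == -1:
--         return None
--     new_str = current_str.replace(src, tgt, 1)
--     return new_str
--
-- def bfs_distance_to_empty(s, transitions, max_depth=10):
--     if s == "":
--         return 0
--
--     queue = deque([(s, 0)])
--     visited = set([s])
--     while queue:
--         current, depth = queue.popleft()
--         if current == "":
--             return depth
--         if depth >= max_depth: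
--             continue
--         for transition in transitions:
--             new_s = apply_transition(current, transition)
--             if new_s is not None and new_s not in visited:
--                 visited.add(new_s)
--                 queue.append((new_s, depth + 1))
--     return None
-- ===== SOURCE B (Python) =====
-- def apply_transition(current_str, transition):
--     src = transition["src"]
--     tgt = transition["tgt"]
--     pos = current_str.find(src)
--     if pos == -1:
--         return None
--     new_str = current_str.replace(src, tgt, 1)
--     return new_str
--
-- def bfs_distance_to_empty(s, transitions, max_depth=10):
--     # Fixed-point iteration of the one-step successor operator on a reachable set:
--     # seen_d = all states reachable from s in <= d rewrite steps; answer = first d with "" in seen_d.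
--     if s == "":
--         return 0
--     seen = {s}
--     for depth in range(max_depth + 1):
--         if "" in seen:
--             return depth
--         if depth == max_depth:
--             break
--         nxt = set(seen)
--         for x in seen:
--             for t in transitions:
--                 y = apply_transition(x, t)
--                 if y is not None:
--                     nxt.add(y)
--         if nxt == seen:
--             break
--         seen = nxt
--     return None
-- ===== Notes on version B (the rewrite author's own statement) =====
-- stated objective: alternative
-- what changed: Replaces A's deque-based BFS (queue of (state,depth) pairs with a visited set) by a fixed-point iteration of the one-step successor operator: a single reachable set seen_d (states reachable in at most d steps) is re-expanded wholesale each round until it contains '' or stabilises; no queue, no frontier, no visited-vs-pending distinction.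
import Mathlib
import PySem

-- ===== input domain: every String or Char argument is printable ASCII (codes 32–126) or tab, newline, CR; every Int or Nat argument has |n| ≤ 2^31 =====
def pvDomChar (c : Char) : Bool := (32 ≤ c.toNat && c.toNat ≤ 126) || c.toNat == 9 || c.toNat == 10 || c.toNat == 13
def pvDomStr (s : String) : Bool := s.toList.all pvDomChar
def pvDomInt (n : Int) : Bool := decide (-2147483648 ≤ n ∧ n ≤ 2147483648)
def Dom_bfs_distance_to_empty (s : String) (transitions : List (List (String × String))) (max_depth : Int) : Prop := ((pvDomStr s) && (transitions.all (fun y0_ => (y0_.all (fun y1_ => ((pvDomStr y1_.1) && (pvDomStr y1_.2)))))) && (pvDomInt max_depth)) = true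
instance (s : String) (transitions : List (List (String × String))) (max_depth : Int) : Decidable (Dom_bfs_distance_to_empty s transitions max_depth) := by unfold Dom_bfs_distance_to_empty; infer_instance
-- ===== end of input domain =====

-- B replaces A's deque BFS (queue + visited set) by a fixed-point iteration of the one-step successor
-- operator on a single reachable set; same return value, B re-expands the whole set each round (objective: alternative).

-- ===== PORT A =====
-- shared helper (both Pythons use the same module-level apply_transition):
-- current_str.replace(src, tgt, 1) is hand-ported as "splice tgt over the first occurrence located by find" — exact,
-- since str.find returns the index of the first occurrence and replace with count=1 rewrites exactly that occurrence.
def applyTransition (cur : String) (t : List (String × String)) : Option String :=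
  let src := ((PySem.Dict.mk t).get? "src").getD ""   -- Pre_ guarantees the key is present (KeyError excluded by Pre_)
  let tgt := ((PySem.Dict.mk t).get? "tgt").getD ""
  let pos := PySem.Str.find cur src
  if pos = -1 then none
  else some (String.ofList (cur.toList.take pos.toNat ++ tgt.toList ++ cur.toList.drop (pos.toNat + src.toList.length)))

-- body of A's inner `for transition in transitions` loop: thread (queue-so-far, visited)
def pvStepA (current : String) (depth : Int)
    (acc : List (String × Int) × PySem.Set String) (t : List (String × String)) :
    List (String × Int) × PySem.Set String :=
  match applyTransition current t with
  | none => acc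
  | some ns => if PySem.Set.contains acc.2 ns then acc
               else (acc.1 ++ [(ns, depth + 1)], PySem.Set.add acc.2 ns)


-- case equations for A's loop body (cited by the fold lemmas and by decreasing_by)
theorem pvStepA_eq_none (cur : String) (d : Int) (acc : List (String × Int) × PySem.Set String)
    (t : List (String × String)) (h : applyTransition cur t = none) :
    pvStepA cur d acc t = acc := by simp [pvStepA, h]

theorem pvStepA_eq_old (cur : String) (d : Int) (acc : List (String × Int) × PySem.Set String)
    (t : List (String × String)) (ns : String) (h : applyTransition cur t = some ns)
    (hc : PySem.Set.contains acc.2 ns = true) :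
    pvStepA cur d acc t = acc := by
  simp only [pvStepA, h]; rw [if_pos hc]

theorem pvStepA_eq_new (cur : String) (d : Int) (acc : List (String × Int) × PySem.Set String)
    (t : List (String × String)) (ns : String) (h : applyTransition cur t = some ns)
    (hc : PySem.Set.contains acc.2 ns = false) :
    pvStepA cur d acc t = (acc.1 ++ [(ns, d + 1)], PySem.Set.add acc.2 ns) := by
  simp only [pvStepA, h]; rw [if_neg (by rw [hc]; simp)]

-- termination measure for A's while-loop: entries at depth d weigh (|transitions|+1)^(max_depth-d)
def pvWeight (m : Int) (B : Nat) (d : Int) : Nat := (B + 1) ^ (m - d).toNat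
def pvMeasureA (m : Int) (B : Nat) (q : List (String × Int)) : Nat :=
  (q.map (fun p => pvWeight m B p.2)).sum

-- shape of one expansion: it only appends ≤ |transitions| entries, all at depth+1 (used by decreasing_by)
theorem pvStepA_shape (trans : List (List (String × String))) (current : String) (depth : Int) :
    ∀ (q : List (String × Int)) (V : PySem.Set String),
    ∃ L, (trans.foldl (pvStepA current depth) (q, V)).1 = q ++ L ∧
      L.length ≤ trans.length ∧ ∀ p ∈ L, p.2 = depth + 1 := by
  induction trans with
  | nil => intro q V; exact ⟨[], by simp, by simp, by simp⟩
  | cons t ts ih =>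
    intro q V
    rw [List.foldl_cons]
    rcases hA : applyTransition current t with _ | ns
    · rw [pvStepA_eq_none current depth (q, V) t hA]
      obtain ⟨L, h1, h2, h3⟩ := ih q V
      exact ⟨L, h1, by simp; omega, h3⟩
    · cases hc : PySem.Set.contains V ns with
      | true =>
        rw [pvStepA_eq_old current depth (q, V) t ns hA hc]
        obtain ⟨L, h1, h2, h3⟩ := ih q V
        exact ⟨L, h1, by simp; omega, h3⟩
      | false =>
        rw [pvStepA_eq_new current depth (q, V) t ns hA hc]
        obtain ⟨L, h1, h2, h3⟩ := ih (q ++ [(ns, depth + 1)]) (PySem.Set.add V ns)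
        refine ⟨(ns, depth + 1) :: L, by simpa using h1, by simpa using h2, ?_⟩
        intro p hp
        rcases List.mem_cons.mp hp with rfl | hp
        · rfl
        · exact h3 p hp

theorem pvWeight_pos (m : Int) (B : Nat) (d : Int) : 1 ≤ pvWeight m B d :=
  Nat.one_le_pow _ _ (by omega)

theorem pvSum_const (m : Int) (B : Nat) (d : Int) :
    ∀ (L : List (String × Int)), (∀ p ∈ L, p.2 = d) →
    (L.map (fun p => pvWeight m B p.2)).sum = L.length * pvWeight m B d := by
  intro L
  induction L with
  | nil => intro _; simp
  | cons p ps ihL =>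
    intro h
    simp only [List.map_cons, List.sum_cons, List.length_cons]
    rw [h p (by simp), ihL (fun q hq => h q (by simp [hq]))]
    ring

-- A's while-loop: queue of (state, depth) pairs, popped from the front
def bfsLoopA (trans : List (List (String × String))) (m : Int)
    (queue : List (String × Int)) (visited : PySem.Set String) : Option Int :=
  match queue with
  | [] => none
  | (current, depth) :: rest =>
    if current = "" then some depth
    else if m ≤ depth then bfsLoopA trans m rest visited
    else
      let st := trans.foldl (pvStepA current depth) (rest, visited)
      bfsLoopA trans m st.1 st.2
termination_by pvMeasureA m trans.length queue
decreasing_by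
  · simp only [pvMeasureA, List.map_cons, List.sum_cons]
    have := pvWeight_pos m trans.length depth; omega
  · simp only [List.foldl_attach]
    obtain ⟨L, h1, h2, h3⟩ := pvStepA_shape trans current depth rest visited
    rw [h1]
    simp only [pvMeasureA, List.map_cons, List.sum_cons, List.map_append, List.sum_append]
    rw [pvSum_const m trans.length (depth + 1) L h3]
    have hk : (m - depth).toNat = (m - (depth + 1)).toNat + 1 := by omega
    have : L.length * pvWeight m trans.length (depth + 1) < pvWeight m trans.length depth := by
      unfold pvWeight
      rw [hk, pow_succ]
      have h4 : 1 ≤ (trans.length + 1) ^ (m - (depth + 1)).toNat := Nat.one_le_pow _ _ (by omega)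
      calc L.length * (trans.length + 1) ^ (m - (depth + 1)).toNat
          ≤ trans.length * (trans.length + 1) ^ (m - (depth + 1)).toNat :=
            Nat.mul_le_mul_right _ h2
        _ < (trans.length + 1) ^ (m - (depth + 1)).toNat * (trans.length + 1) := by
            rw [Nat.mul_comm]; nlinarith [h4]
    omega

def bfs_distance_to_empty (s : String) (transitions : List (List (String × String))) (max_depth : Int) : Option Int :=
  if s = "" then some 0
  else bfsLoopA transitions max_depth [(s, 0)] (PySem.Set.ofList [s])

-- ===== PORT B =====
-- one round of B: nxt = copy of seen, then add every successor of every element of seen.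
-- (the Python iterates over the set `seen`; the result is a set consumed only by membership,
-- equality and the next round, so the iteration order cannot affect the return value)
def satStep (trans : List (List (String × String))) (seen : PySem.Set String) : PySem.Set String :=
  seen.foldl (fun nxt x =>
    trans.foldl (fun nxt t =>
      match applyTransition x t with
      | none => nxt
      | some y => PySem.Set.add nxt y) nxt) seen

-- B's `for depth in range(max_depth + 1)` loop, fuel = number of remaining iterations;
-- the `if depth == max_depth: break` makes the depth = m iteration return without expanding
def satLoop (trans : List (List (String × String))) (m : Int)
    (fuel : Nat) (depth : Int) (seen : PySem.Set String) : Option Int :=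
  match fuel with
  | 0 => none
  | Nat.succ fuel' =>
    if "" ∈ seen then some depth
    else if depth = m then none
    else
      let nxt := satStep trans seen
      if PySem.Set.equal nxt seen then none
      else satLoop trans m fuel' (depth + 1) nxt

def bfs_distance_to_empty_alt (s : String) (transitions : List (List (String × String))) (max_depth : Int) : Option Int :=
  if s = "" then some 0
  else satLoop transitions max_depth (max_depth + 1).toNat 0 (PySem.Set.ofList [s])

-- ===== PRECONDITION & SPEC =====
-- Pre_ excludes only the inputs on which Python A raises KeyError: a transition dict missing the "src" or
-- "tgt" key, reached because the BFS actually expands a state (s nonempty and max_depth positive).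
def Pre_bfs_distance_to_empty (s : String) (transitions : List (List (String × String))) (max_depth : Int) : Prop :=
  s = "" ∨ max_depth ≤ 0 ∨
    ∀ t ∈ transitions, ((PySem.Dict.mk t).contains "src") = true ∧ ((PySem.Dict.mk t).contains "tgt") = true
instance (s : String) (transitions : List (List (String × String))) (max_depth : Int) : Decidable (Pre_bfs_distance_to_empty s transitions max_depth) := by unfold Pre_bfs_distance_to_empty; infer_instance

def pvWitness_bfs_distance_to_empty : String × (List (List (String × String))) × Int :=
  ("ab", [[("src", "a"), ("tgt", "")], [("src", "b"), ("tgt", "")]], 10)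

def Spec_bfs_distance_to_empty (s : String) (transitions : List (List (String × String))) (max_depth : Int) (out : Option Int) : Prop := out = bfs_distance_to_empty_alt s transitions max_depth
instance (s : String) (transitions : List (List (String × String))) (max_depth : Int) (out : Option Int) : Decidable (Spec_bfs_distance_to_empty s transitions max_depth out) := by unfold Spec_bfs_distance_to_empty; infer_instance

-- ===== CLAIM (what is proved, stated in full; the proofs are below) =====
def Claim_equal_bfs_distance_to_empty : Prop := ∀ (s : String) (transitions : List (List (String × String))) (max_depth : Int), Dom_bfs_distance_to_empty s transitions max_depth → Pre_bfs_distance_to_empty s transitions max_depth → Spec_bfs_distance_to_empty s transitions max_depth (bfs_distance_to_empty s transitions max_depth)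

-- ===== LEMMAS AND PROOFS =====

-- proof-internal intermediate: a level-synchronous BFS (visited set + per-depth frontier list).
-- A is proved equal to it level by level, and it is proved equal to B's saturation loop.
def pvStepB (current : String)
    (acc : PySem.Set String × List String) (t : List (String × String)) :
    PySem.Set String × List String :=
  match applyTransition current t with
  | none => acc
  | some ns => if PySem.Set.contains acc.1 ns then acc
               else (PySem.Set.add acc.1 ns, acc.2 ++ [ns])

def bfsLoopB (trans : List (List (String × String))) (m : Int)
    (fuel : Nat) (depth : Int) (visited : PySem.Set String) (frontier : List String) : Option Int :=
  match fuel with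
  | 0 => none
  | Nat.succ fuel' =>
    if "" ∈ frontier then some depth
    else if depth = m then none
    else if frontier = [] then none
    else
      let st := frontier.foldl (fun acc cur => trans.foldl (pvStepB cur) acc) (visited, ([] : List String))
      bfsLoopB trans m fuel' (depth + 1) st.1 st.2

theorem bfsLoopA_nil (trans : List (List (String × String))) (m : Int) (V : PySem.Set String) :
    bfsLoopA trans m [] V = none := by
  rw [bfsLoopA.eq_def]

theorem bfsLoopA_cons (trans : List (List (String × String))) (m : Int)
    (current : String) (depth : Int) (rest : List (String × Int)) (V : PySem.Set String) :
    bfsLoopA trans m ((current, depth) :: rest) V =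
      if current = "" then some depth
      else if m ≤ depth then bfsLoopA trans m rest V
      else bfsLoopA trans m (trans.foldl (pvStepA current depth) (rest, V)).1
             (trans.foldl (pvStepA current depth) (rest, V)).2 := by
  rw [bfsLoopA.eq_def]

theorem pvStepB_eq_none (cur : String) (acc : PySem.Set String × List String)
    (t : List (String × String)) (h : applyTransition cur t = none) :
    pvStepB cur acc t = acc := by simp [pvStepB, h]

theorem pvStepB_eq_old (cur : String) (acc : PySem.Set String × List String)
    (t : List (String × String)) (ns : String) (h : applyTransition cur t = some ns)
    (hc : PySem.Set.contains acc.1 ns = true) :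
    pvStepB cur acc t = acc := by
  simp only [pvStepB, h]; rw [if_pos hc]

theorem pvStepB_eq_new (cur : String) (acc : PySem.Set String × List String)
    (t : List (String × String)) (ns : String) (h : applyTransition cur t = some ns)
    (hc : PySem.Set.contains acc.1 ns = false) :
    pvStepB cur acc t = (PySem.Set.add acc.1 ns, acc.2 ++ [ns]) := by
  simp only [pvStepB, h]; rw [if_neg (by rw [hc]; simp)]

-- B's inner fold only appends to the next_frontier component
theorem pvFoldB_acc (trans : List (List (String × String))) (cur : String) :
    ∀ (V : PySem.Set String) (l : List String),
    trans.foldl (pvStepB cur) (V, l)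
      = ((trans.foldl (pvStepB cur) (V, [])).1, l ++ (trans.foldl (pvStepB cur) (V, [])).2) := by
  induction trans with
  | nil => intro V l; simp
  | cons t ts ih =>
    intro V l
    rw [List.foldl_cons, List.foldl_cons]
    rcases hA : applyTransition cur t with _ | ns
    · rw [pvStepB_eq_none cur (V, l) t hA, pvStepB_eq_none cur (V, []) t hA]
      exact ih V l
    · cases hc : PySem.Set.contains V ns with
      | true =>
        rw [pvStepB_eq_old cur (V, l) t ns hA hc, pvStepB_eq_old cur (V, []) t ns hA hc]
        exact ih V l
      | false =>
        rw [pvStepB_eq_new cur (V, l) t ns hA hc, pvStepB_eq_new cur (V, []) t ns hA hc]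
        rw [ih (PySem.Set.add V ns) (l ++ [ns]), ih (PySem.Set.add V ns) ([] ++ [ns])]
        simp

-- A's inner fold is the level fold: same visited set, and it appends exactly its new states tagged depth+1
theorem pvFoldAB (trans : List (List (String × String))) (cur : String) (depth : Int) :
    ∀ (q : List (String × Int)) (V : PySem.Set String),
    trans.foldl (pvStepA cur depth) (q, V)
      = (q ++ ((trans.foldl (pvStepB cur) (V, [])).2).map (fun ns => (ns, depth + 1)),
         (trans.foldl (pvStepB cur) (V, [])).1) := by
  induction trans with
  | nil => intro q V; simp
  | cons t ts ih =>
    intro q V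
    rw [List.foldl_cons, List.foldl_cons]
    rcases hA : applyTransition cur t with _ | ns
    · rw [pvStepA_eq_none cur depth (q, V) t hA, pvStepB_eq_none cur (V, []) t hA]
      exact ih q V
    · cases hc : PySem.Set.contains V ns with
      | true =>
        rw [pvStepA_eq_old cur depth (q, V) t ns hA hc, pvStepB_eq_old cur (V, []) t ns hA hc]
        exact ih q V
      | false =>
        rw [pvStepA_eq_new cur depth (q, V) t ns hA hc, pvStepB_eq_new cur (V, []) t ns hA hc]
        rw [ih (q ++ [(ns, depth + 1)]) (PySem.Set.add V ns),
            pvFoldB_acc ts cur (PySem.Set.add V ns) ([] ++ [ns])]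
        simp

-- the level fold only appends to the next_frontier component
theorem pvLevelB_acc (trans : List (List (String × String))) :
    ∀ (frontier : List String) (V : PySem.Set String) (l : List String),
    frontier.foldl (fun acc cur => trans.foldl (pvStepB cur) acc) (V, l)
      = ((frontier.foldl (fun acc cur => trans.foldl (pvStepB cur) acc) (V, [])).1,
         l ++ (frontier.foldl (fun acc cur => trans.foldl (pvStepB cur) acc) (V, [])).2) := by
  intro frontier
  induction frontier with
  | nil => intro V l; simp
  | cons c cs ih =>
    intro V l
    rw [List.foldl_cons, List.foldl_cons]
    rw [pvFoldB_acc trans c V l]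
    rcases h : trans.foldl (pvStepB c) (V, []) with ⟨V₁, l₁⟩
    rw [ih V₁ (l ++ l₁), ih V₁ l₁]
    simp

-- if "" is pending at depth d, A returns d (later-level entries after it cannot matter)
theorem pvA_found (trans : List (List (String × String))) (m : Int) (d : Int) :
    ∀ (rest : List String) (acc : List (String × Int)) (V : PySem.Set String),
    "" ∈ rest →
    bfsLoopA trans m (rest.map (fun x => (x, d)) ++ acc) V = some d := by
  intro rest
  induction rest with
  | nil => intro acc V h; simp at h
  | cons c cs ih =>
    intro acc V h
    simp only [List.map_cons, List.cons_append]
    rw [bfsLoopA_cons]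
    by_cases hc : c = ""
    · simp [hc]
    · have hcs : "" ∈ cs := by
        rcases List.mem_cons.mp h with h1 | h1
        · exact absurd h1.symm hc
        · exact h1
      rw [if_neg hc]
      by_cases hm : m ≤ d
      · rw [if_pos hm]; exact ih acc V hcs
      · rw [if_neg hm]
        rw [pvFoldAB trans c d (cs.map (fun x => (x, d)) ++ acc) V]
        rw [List.append_assoc]
        exact ih _ _ hcs

-- at depth ≥ max_depth with no "" pending, A drains the queue and returns None
theorem pvA_drain (trans : List (List (String × String))) (m : Int) (d : Int) (hm : m ≤ d) :
    ∀ (rest : List String) (V : PySem.Set String), "" ∉ rest →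
    bfsLoopA trans m (rest.map (fun x => (x, d))) V = none := by
  intro rest
  induction rest with
  | nil => intro V _; exact bfsLoopA_nil trans m V
  | cons c cs ih =>
    intro V h
    have hc : ¬ c = "" := fun hc => h (by simp [hc])
    simp only [List.map_cons]
    rw [bfsLoopA_cons, if_neg hc, if_pos hm]
    exact ih V (fun hx => h (by simp [hx]))

-- processing one whole level of A = the level fold
theorem pvA_level (trans : List (List (String × String))) (m : Int) (d : Int) (hd : d < m) :
    ∀ (rest : List String) (acc : List String) (V : PySem.Set String), "" ∉ rest →
    bfsLoopA trans m (rest.map (fun x => (x, d)) ++ acc.map (fun x => (x, d + 1))) V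
      = bfsLoopA trans m
          ((acc ++ (rest.foldl (fun a cur => trans.foldl (pvStepB cur) a) (V, [])).2).map (fun x => (x, d + 1)))
          (rest.foldl (fun a cur => trans.foldl (pvStepB cur) a) (V, [])).1 := by
  intro rest
  induction rest with
  | nil => intro acc V _; simp
  | cons c cs ih =>
    intro acc V h
    have hc : ¬ c = "" := fun hc => h (by simp [hc])
    have hnm : ¬ m ≤ d := not_le.mpr hd
    simp only [List.map_cons, List.cons_append]
    rw [bfsLoopA_cons, if_neg hc, if_neg hnm]
    rw [pvFoldAB trans c d (cs.map (fun x => (x, d)) ++ acc.map (fun x => (x, d + 1))) V]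
    simp only [List.foldl_cons]
    rcases h1 : trans.foldl (pvStepB c) (V, []) with ⟨V₁, l₁⟩
    rw [List.append_assoc, ← List.map_append,
        ih (acc ++ l₁) V₁ (fun hx => h (by simp [hx])),
        pvLevelB_acc trans cs V₁ l₁]
    simp

-- the deque loop and the level loop agree level by level
theorem pvLoop_eq (trans : List (List (String × String))) (m : Int) :
    ∀ (fuel : Nat) (d : Int) (V : PySem.Set String) (frontier : List String),
    d + (fuel : Int) = m + 1 → d ≤ m →
    bfsLoopA trans m (frontier.map (fun x => (x, d))) V = bfsLoopB trans m fuel d V frontier := by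
  intro fuel
  induction fuel with
  | zero => intro d V frontier hf hd; simp at hf; omega
  | succ f ih =>
    intro d V frontier hf hd
    rw [bfsLoopB]
    by_cases hmem : "" ∈ frontier
    · simp only [hmem, if_true]
      have := pvA_found trans m d frontier [] V hmem
      simpa using this
    · simp only [hmem, if_false]
      by_cases hdm : d = m
      · simp only [hdm, if_true]
        exact pvA_drain trans m m le_rfl frontier V hmem
      · simp only [hdm, if_false]
        by_cases hfr : frontier = []
        · simp only [hfr, if_true]; subst hfr
          simpa using bfsLoopA_nil trans m V
        · simp only [hfr, if_false]
          have hlt : d < m := lt_of_le_of_ne hd hdm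
          have h1 := pvA_level trans m d hlt frontier [] V hmem
          simp only [List.nil_append, List.map_nil, List.append_nil] at h1
          rw [h1]
          exact ih (d + 1) _ _ (by push_cast at hf ⊢; omega) (by omega)

-- ========== level loop = saturation loop ==========

-- "y is a one-step successor of x" / "of some member of L"
def pvSucc1 (trans : List (List (String × String))) (x y : String) : Prop :=
  ∃ t ∈ trans, applyTransition x t = some y
def pvSuccL (trans : List (List (String × String))) (L : List String) (y : String) : Prop :=
  ∃ c ∈ L, pvSucc1 trans c y

-- membership of B's inner fold (over trans, for one source x)
theorem pvSatInner_mem (trans : List (List (String × String))) (x : String) :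
    ∀ (acc : PySem.Set String) (y : String),
    (y ∈ trans.foldl (fun nxt t =>
        match applyTransition x t with
        | none => nxt
        | some z => PySem.Set.add nxt z) acc) ↔ (y ∈ acc ∨ pvSucc1 trans x y) := by
  induction trans with
  | nil => intro acc y; simp [pvSucc1]
  | cons t ts ih =>
    intro acc y
    rw [List.foldl_cons]
    rcases hA : applyTransition x t with _ | ns
    · rw [ih]
      constructor
      · rintro (h | ⟨t', ht', h'⟩)
        · exact Or.inl h
        · exact Or.inr ⟨t', by simp [ht'], h'⟩
      · rintro (h | ⟨t', ht', h'⟩)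
        · exact Or.inl h
        · rcases List.mem_cons.mp ht' with rfl | ht'
          · rw [hA] at h'; cases h'
          · exact Or.inr ⟨t', ht', h'⟩
    · rw [ih]
      rw [PySem.Set.mem_add]
      constructor
      · rintro ((h | rfl) | ⟨t', ht', h'⟩)
        · exact Or.inl h
        · exact Or.inr ⟨t, by simp, hA⟩
        · exact Or.inr ⟨t', by simp [ht'], h'⟩
      · rintro (h | ⟨t', ht', h'⟩)
        · exact Or.inl (Or.inl h)
        · rcases List.mem_cons.mp ht' with rfl | ht'
          · rw [hA] at h'; injection h' with h'; exact Or.inl (Or.inr h'.symm)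
          · exact Or.inr ⟨t', ht', h'⟩

-- membership of B's round: seen ∪ successors(seen)
theorem pvSatStep_mem (trans : List (List (String × String))) (S : PySem.Set String) (y : String) :
    y ∈ satStep trans S ↔ y ∈ S ∨ pvSuccL trans S y := by
  unfold satStep
  suffices h : ∀ (L : List String) (acc : PySem.Set String),
      (y ∈ L.foldl (fun nxt x =>
        trans.foldl (fun nxt t =>
          match applyTransition x t with
          | none => nxt
          | some z => PySem.Set.add nxt z) nxt) acc) ↔ (y ∈ acc ∨ pvSuccL trans L y) by
    exact h S S
  intro L
  induction L with
  | nil => intro acc; simp [pvSuccL]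
  | cons c cs ih =>
    intro acc
    rw [List.foldl_cons, ih, pvSatInner_mem]
    constructor
    · rintro ((h | h) | ⟨c', hc', h'⟩)
      · exact Or.inl h
      · exact Or.inr ⟨c, by simp, h⟩
      · exact Or.inr ⟨c', by simp [hc'], h'⟩
    · rintro (h | ⟨c', hc', h'⟩)
      · exact Or.inl (Or.inl h)
      · rcases List.mem_cons.mp hc' with rfl | hc'
        · exact Or.inl (Or.inr h')
        · exact Or.inr ⟨c', hc', h'⟩

-- cons/nil unfoldings of the successor predicates
theorem pvSucc1_nil (x y : String) : pvSucc1 [] x y ↔ False := by simp [pvSucc1]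
theorem pvSucc1_cons (t : List (String × String)) (ts : List (List (String × String)))
    (x y : String) : pvSucc1 (t :: ts) x y ↔ (applyTransition x t = some y ∨ pvSucc1 ts x y) := by
  simp [pvSucc1]
theorem pvSuccL_nil (trans : List (List (String × String))) (y : String) :
    pvSuccL trans [] y ↔ False := by simp [pvSuccL]
theorem pvSuccL_cons (trans : List (List (String × String))) (c : String) (cs : List String)
    (y : String) : pvSuccL trans (c :: cs) y ↔ (pvSucc1 trans c y ∨ pvSuccL trans cs y) := by
  simp [pvSuccL]

-- pvSuccL only depends on the membership of its list
theorem pvSuccL_congr (trans : List (List (String × String))) (L L' : List String)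
    (h : ∀ x, x ∈ L ↔ x ∈ L') (y : String) : pvSuccL trans L y ↔ pvSuccL trans L' y := by
  unfold pvSuccL
  constructor
  · rintro ⟨c, hc, h1⟩; exact ⟨c, (h c).mp hc, h1⟩
  · rintro ⟨c, hc, h1⟩; exact ⟨c, (h c).mpr hc, h1⟩

-- membership of the inner transition fold of the level loop: visited' = V ∪ succ1(cur), new states appended
theorem pvStepBFold_mem (cur : String) :
    ∀ (ts : List (List (String × String))) (acc : PySem.Set String × List String) (y : String),
    ((y ∈ (ts.foldl (pvStepB cur) acc).1) ↔ (y ∈ acc.1 ∨ pvSucc1 ts cur y)) ∧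
    ((y ∈ (ts.foldl (pvStepB cur) acc).2) ↔ (y ∈ acc.2 ∨ (pvSucc1 ts cur y ∧ y ∉ acc.1))) := by
  intro ts
  induction ts with
  | nil => intro acc y; simp [pvSucc1_nil]
  | cons t ts ih =>
    intro acc y
    rw [List.foldl_cons]
    rcases hA : applyTransition cur t with _ | ns
    · rw [pvStepB_eq_none cur acc t hA]
      obtain ⟨h1, h2⟩ := ih acc y
      rw [h1, h2, pvSucc1_cons]
      constructor
      · constructor
        · rintro (h | h); exact Or.inl h; exact Or.inr (Or.inr h)
        · rintro (h | (h | h))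
          · exact Or.inl h
          · rw [hA] at h; cases h
          · exact Or.inr h
      · constructor
        · rintro (h | h); exact Or.inl h; exact Or.inr ⟨Or.inr h.1, h.2⟩
        · rintro (h | ⟨(h | h), hv⟩)
          · exact Or.inl h
          · rw [hA] at h; cases h
          · exact Or.inr ⟨h, hv⟩
    · by_cases hmem : ns ∈ acc.1
      · rw [pvStepB_eq_old cur acc t ns hA ((PySem.Set.contains_iff _ _).mpr hmem)]
        obtain ⟨h1, h2⟩ := ih acc y
        rw [h1, h2, pvSucc1_cons]
        constructor
        · constructor
          · rintro (h | h); exact Or.inl h; exact Or.inr (Or.inr h)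
          · rintro (h | (h | h))
            · exact Or.inl h
            · rw [hA] at h; injection h with h; exact Or.inl (h ▸ hmem)
            · exact Or.inr h
        · constructor
          · rintro (h | h); exact Or.inl h; exact Or.inr ⟨Or.inr h.1, h.2⟩
          · rintro (h | ⟨(h | h), hv⟩)
            · exact Or.inl h
            · rw [hA] at h; injection h with h; exact absurd (h ▸ hmem) hv
            · exact Or.inr ⟨h, hv⟩
      · have hc : PySem.Set.contains acc.1 ns = false := by
          cases hcc : PySem.Set.contains acc.1 ns
          · rfl
          · exact absurd ((PySem.Set.contains_iff _ _).mp hcc) hmem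
        rw [pvStepB_eq_new cur acc t ns hA hc]
        obtain ⟨h1, h2⟩ := ih (PySem.Set.add acc.1 ns, acc.2 ++ [ns]) y
        rw [h1, h2, pvSucc1_cons]
        simp only [PySem.Set.mem_add, List.mem_append, List.mem_singleton]
        constructor
        · constructor
          · rintro ((h | rfl) | h)
            · exact Or.inl h
            · exact Or.inr (Or.inl hA)
            · exact Or.inr (Or.inr h)
          · rintro (h | (h | h))
            · exact Or.inl (Or.inl h)
            · rw [hA] at h; injection h with h; exact Or.inl (Or.inr h.symm)
            · exact Or.inr h
        · constructor
          · rintro ((h | rfl) | ⟨h, hv⟩)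
            · exact Or.inl h
            · exact Or.inr ⟨Or.inl hA, hmem⟩
            · exact Or.inr ⟨Or.inr h, fun hy => hv (Or.inl hy)⟩
          · rintro (h | ⟨(h | h), hv⟩)
            · exact Or.inl (Or.inl h)
            · rw [hA] at h; injection h with h; exact Or.inl (Or.inr h.symm)
            · by_cases hns : y = ns
              · exact Or.inl (Or.inr hns)
              · exact Or.inr ⟨h, fun hy => hy.elim hv hns⟩

-- membership of the level fold: visited' = V ∪ succ(F), frontier' = succ(F) \ V
theorem pvLevelFold_mem (trans : List (List (String × String))) :
    ∀ (F : List String) (acc : PySem.Set String × List String) (y : String),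
    ((y ∈ (F.foldl (fun a cur => trans.foldl (pvStepB cur) a) acc).1) ↔
        (y ∈ acc.1 ∨ pvSuccL trans F y)) ∧
    ((y ∈ (F.foldl (fun a cur => trans.foldl (pvStepB cur) a) acc).2) ↔
        (y ∈ acc.2 ∨ (pvSuccL trans F y ∧ y ∉ acc.1))) := by
  intro F
  induction F with
  | nil => intro acc y; simp [pvSuccL_nil]
  | cons c cs ih =>
    intro acc y
    rw [List.foldl_cons]
    obtain ⟨g1, g2⟩ := pvStepBFold_mem c trans acc y
    obtain ⟨h1, h2⟩ := ih (trans.foldl (pvStepB c) acc) y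
    rw [h1, h2, g1, g2, pvSuccL_cons]
    exact ⟨by tauto, by tauto⟩

-- successors of the whole visited set stay inside V ∪ succ(F) under the closure invariant
theorem pvSuccV_split (trans : List (List (String × String))) (V : PySem.Set String)
    (F : List String) (hcl : ∀ x, x ∈ V → x ∉ F → ∀ y, pvSucc1 trans x y → y ∈ V) (y : String)
    (h : pvSuccL trans V y) : y ∈ V ∨ pvSuccL trans F y := by
  obtain ⟨c, hcV, h1⟩ := h
  by_cases hcF : c ∈ F
  · exact Or.inr ⟨c, hcF, h1⟩
  · exact Or.inl (hcl c hcV hcF y h1)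

-- an empty frontier makes the level loop return None whatever the fuel
theorem pvLevelB_nil (trans : List (List (String × String))) (m : Int)
    (fuel : Nat) (d : Int) (V : PySem.Set String) :
    bfsLoopB trans m fuel d V [] = none := by
  cases fuel with
  | zero => rfl
  | succ f => rw [bfsLoopB]; simp

-- main bridge: the level loop equals B's saturation loop under the stated invariants
theorem pvSat_eq (trans : List (List (String × String))) (m : Int) :
    ∀ (fuel : Nat) (d : Int) (V : PySem.Set String) (F : List String) (S : PySem.Set String),
    (∀ y, y ∈ S ↔ y ∈ V) →
    (("" ∈ S) ↔ ("" ∈ F)) →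
    (∀ x ∈ F, x ∈ V) →
    (∀ x, x ∈ V → x ∉ F → ∀ y, pvSucc1 trans x y → y ∈ V) →
    bfsLoopB trans m fuel d V F = satLoop trans m fuel d S := by
  intro fuel
  induction fuel with
  | zero => intro d V F S _ _ _ _; rfl
  | succ f ih =>
    intro d V F S hSV hSF hFV hcl
    rw [bfsLoopB, satLoop]
    by_cases hmem : "" ∈ F
    · rw [if_pos hmem, if_pos (hSF.mpr hmem)]
    · rw [if_neg hmem, if_neg (fun h => hmem (hSF.mp h))]
      by_cases hdm : d = m
      · rw [if_pos hdm, if_pos hdm]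
      · rw [if_neg hdm, if_neg hdm]
        -- membership of one saturation round
        have hnxt : ∀ y, y ∈ satStep trans S ↔ (y ∈ V ∨ pvSuccL trans F y) := by
          intro y
          rw [pvSatStep_mem]
          constructor
          · rintro (h | h)
            · exact Or.inl ((hSV y).mp h)
            · exact pvSuccV_split trans V F hcl y ((pvSuccL_congr trans S V hSV y).mp h)
          · rintro (h | ⟨c, hcF, h1⟩)
            · exact Or.inl ((hSV y).mpr h)
            · exact Or.inr ((pvSuccL_congr trans S V hSV y).mpr ⟨c, hFV c hcF, h1⟩)
        by_cases hF : F = []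
        · rw [if_pos hF]
          have hequal : PySem.Set.equal (satStep trans S) S = true := by
            rw [PySem.Set.equal_iff]
            intro y
            rw [hnxt y, hSV y, hF, pvSuccL_nil]
            tauto
          rw [if_pos hequal]
        · rw [if_neg hF]
          -- membership of the level fold
          have hV' : ∀ y, y ∈ (F.foldl (fun a cur => trans.foldl (pvStepB cur) a) (V, ([] : List String))).1
              ↔ (y ∈ V ∨ pvSuccL trans F y) := by
            intro y
            have := (pvLevelFold_mem trans F (V, ([] : List String)) y).1
            simpa using this
          have hF' : ∀ y, y ∈ (F.foldl (fun a cur => trans.foldl (pvStepB cur) a) (V, ([] : List String))).2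
              ↔ (pvSuccL trans F y ∧ y ∉ V) := by
            intro y
            have := (pvLevelFold_mem trans F (V, ([] : List String)) y).2
            simpa using this
          by_cases heq : ∀ y, y ∈ satStep trans S ↔ y ∈ S
          · -- saturation: fixed point reached, None; level loop: frontier becomes empty, None
            rw [if_pos ((PySem.Set.equal_iff _ _).mpr heq)]
            have hfe : (F.foldl (fun a cur => trans.foldl (pvStepB cur) a) (V, ([] : List String))).2 = [] := by
              rw [List.eq_nil_iff_forall_not_mem]
              intro y hy
              obtain ⟨hs, hv⟩ := (hF' y).mp hy
              exact hv ((hSV y).mp ((heq y).mp ((hnxt y).mpr (Or.inr hs))))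
            show bfsLoopB trans m f (d + 1)
                (F.foldl (fun acc cur => trans.foldl (pvStepB cur) acc) (V, ([] : List String))).1
                (F.foldl (fun acc cur => trans.foldl (pvStepB cur) acc) (V, ([] : List String))).2 = none
            rw [hfe]
            exact pvLevelB_nil trans m f (d + 1) _
          · have hequal : PySem.Set.equal (satStep trans S) S = false := by
              cases hcc : PySem.Set.equal (satStep trans S) S
              · rfl
              · exact absurd ((PySem.Set.equal_iff _ _).mp hcc) heq
            rw [if_neg (by rw [hequal]; simp)]
            show bfsLoopB trans m f (d + 1)
                (F.foldl (fun acc cur => trans.foldl (pvStepB cur) acc) (V, ([] : List String))).1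
                (F.foldl (fun acc cur => trans.foldl (pvStepB cur) acc) (V, ([] : List String))).2
              = satLoop trans m f (d + 1) (satStep trans S)
            apply ih
            · intro y; rw [hnxt y, hV' y]
            · have hnotV : ("" : String) ∉ V := fun h => hmem (hSF.mp ((hSV "").mpr h))
              rw [hnxt "", hF' ""]
              tauto
            · intro x hx
              rw [hF' x] at hx
              rw [hV' x]
              exact Or.inr hx.1
            · intro x hx hnx y hy
              rw [hV' x] at hx
              rw [hV' y]
              have hxV : x ∈ V := by
                rcases hx with h | h
                · exact h
                · by_cases hv : x ∈ V
                  · exact hv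
                  · exact absurd ((hF' x).mpr ⟨h, hv⟩) hnx
              by_cases hxF : x ∈ F
              · exact Or.inr ⟨x, hxF, hy⟩
              · exact Or.inl (hcl x hxV hxF y hy)

-- ===== VERDICT (by name: the statement is the Claim_ definition above) =====
theorem bfs_distance_to_empty_spec : Claim_equal_bfs_distance_to_empty := by
  intro s trans m _ _
  unfold Spec_bfs_distance_to_empty bfs_distance_to_empty bfs_distance_to_empty_alt
  by_cases hs : s = ""
  · simp [hs]
  · simp only [hs, if_false]
    have hbridge : bfsLoopB trans m (m + 1).toNat 0 (PySem.Set.ofList [s]) [s]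
        = satLoop trans m (m + 1).toNat 0 (PySem.Set.ofList [s]) := by
      apply pvSat_eq
      · intro y; exact Iff.rfl
      · rw [PySem.Set.mem_ofList]
      · intro x hx; rw [PySem.Set.mem_ofList]; simpa using hx
      · intro x hx hnx y _
        rw [PySem.Set.mem_ofList] at hx
        simp at hx
        exact absurd (by simp [hx]) hnx
    rw [← hbridge]
    by_cases hm : 0 ≤ m
    · have := pvLoop_eq trans m (m + 1).toNat 0 (PySem.Set.ofList [s]) [s] (by omega) hm
      simpa using this
    · have h0 : (m + 1).toNat = 0 := by omega
      rw [h0, bfsLoopA_cons, if_neg hs, if_pos (show m ≤ 0 by omega)]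
      exact bfsLoopA_nil trans m (PySem.Set.ofList [s])
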